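-- pv_equiv track=rewrite | github.com/miliar/Code_Jam_Webscraper | solutions_python/solutions_year17_round4_nr2/71.py | solve
-- ===== SOURCE A (Python) =====
-- def solve(n, c, tickets):
--     tickets.sort()
--     trains = 1
--     count = [0] * c
--     seat = [0] * n
--     total = 0
--     for p, b in tickets:
--         count[b - 1] += 1
--         seat[p - 1] += 1
--         total += 1
--         while p * trains < total:
--             trains += 1
--     trains = max(trains, max(count))
--     upgrade = 0
--     for x in seat:
--         upgrade += max(0, x - trains)
--     return (trains, upgrade)
-- ===== SOURCE B (Python) =====
-- def solve(n, c, tickets):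
--     # Histogram sweep instead of sort-and-scan; does not mutate `tickets`
--     # (A sorts it in place; return-value equivalence only).
--     count = [0] * c
--     seat = [0] * n
--     for p, b in tickets:
--         count[b - 1] += 1
--         seat[p - 1] += 1
--     trains = 1
--     cum = 0
--     for q in range(1, n + 1):
--         cum += seat[q - 1]
--         t = -(-cum // q)
--         if t > trains:
--             trains = t
--     m = max(count)
--     if m > trains:
--         trains = m
--     upgrade = 0
--     for x in seat:
--         if x > trains:
--             upgrade += x - trains
--     return (trains, upgrade)
-- ===== Notes on version B (the rewrite author's own statement) =====
-- stated objective: alternative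
-- what changed: B drops the sort entirely: it builds the two histograms in one pass and computes the train minimum by a single sweep over positions 1..n with a running prefix sum and ceiling division, instead of A's sort followed by an incremental while-loop per sorted ticket.
-- outside the precondition, e.g. on solve(2, 2, [(1, 0)]): A returns (1, 0), B returns (1, 0); on solve(1, 1, [(0, 1)]): A does not finish within the time limit, B returns (1, 0)
import Mathlib
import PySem

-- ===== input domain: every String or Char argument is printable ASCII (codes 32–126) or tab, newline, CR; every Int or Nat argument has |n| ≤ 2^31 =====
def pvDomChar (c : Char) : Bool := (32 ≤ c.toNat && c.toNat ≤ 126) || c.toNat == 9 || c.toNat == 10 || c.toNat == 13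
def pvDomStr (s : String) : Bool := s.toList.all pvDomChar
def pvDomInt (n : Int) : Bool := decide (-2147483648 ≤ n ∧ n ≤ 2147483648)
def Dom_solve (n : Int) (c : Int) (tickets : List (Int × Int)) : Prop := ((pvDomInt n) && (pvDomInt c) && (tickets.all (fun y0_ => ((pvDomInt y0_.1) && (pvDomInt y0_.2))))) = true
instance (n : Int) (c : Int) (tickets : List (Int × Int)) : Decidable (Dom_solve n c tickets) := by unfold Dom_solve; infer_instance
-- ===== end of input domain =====

-- B replaces A's sort + per-ticket while-loop by two histograms and a single position
-- sweep with ceiling division (objective: alternative, sort-free). A sorts `tickets` in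
-- place; only return-value equivalence is claimed here.


-- ===== PORT A =====
-- ===== PORT A =====
-- `l[i] += 1` on a histogram list (the index is in range under Pre_, so `.toNat` is exact)
def pvBump (l : List Int) (i : Int) : List Int := l.set i.toNat (l.getD i.toNat 0 + 1)

-- `while p * trains < total: trains += 1`; fuel `total.toNat` suffices under Pre_
-- (p ≥ 1, trains ≥ 1), where the loop body runs fewer than `total` times
def pvWhile (fuel : Nat) (p total trains : Int) : Int :=
  match fuel with
  | 0 => trains
  | fuel + 1 => if p * trains < total then pvWhile fuel p total (trains + 1) else trains

-- one iteration of A's `for p, b in tickets` loop, state (trains, count, seat, total)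
def pvLoopA (st : Int × List Int × List Int × Int) (pb : Int × Int) :
    Int × List Int × List Int × Int :=
  let count := pvBump st.2.1 (pb.2 - 1)
  let seat := pvBump st.2.2.1 (pb.1 - 1)
  let total := st.2.2.2 + 1
  (pvWhile total.toNat pb.1 total st.1, count, seat, total)

-- A's tail: trains = max(trains, max(count)); upgrade loop.  max([]) raises in Python,
-- so the `.getD 0` default is never read under Pre_ (c ≥ 1)
def pvFinishA (st : Int × List Int × List Int × Int) : Int × Int :=
  let trains := max st.1 ((PySem.List.max? st.2.1 (fun y => y)).getD 0)
  (trains, st.2.2.1.foldl (fun u x => u + max 0 (x - trains)) 0)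

def solve (n : Int) (c : Int) (tickets : List (Int × Int)) : Int × Int :=
  -- tickets.sort(): lexicographic tuple sort
  pvFinishA ((PySem.List.sorted2 tickets Prod.fst Prod.snd).foldl pvLoopA
    (1, List.replicate c.toNat 0, List.replicate n.toNat 0, (0 : Int)))

-- ===== PORT B =====
-- B's own `l[i] += 1` (same primitive operation, B-side copy)
def pvBumpB (l : List Int) (i : Int) : List Int := l.set i.toNat (l.getD i.toNat 0 + 1)

-- one iteration of B's sweep over positions q = 1..n, state (trains, cum)
def pvSweepB (seat : List Int) (tc : Int × Int) (q : Int) : Int × Int :=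
  let cum := tc.2 + seat.getD (q - 1).toNat 0
  let t := -(PySem.Int.floordiv (-cum) q)   -- -(-cum // q)
  (if t > tc.1 then t else tc.1, cum)

-- B's tail: sweep, max(count) (never read under Pre_, as in A), upgrade loop
def pvFinishB (n : Int) (hs : List Int × List Int) : Int × Int :=
  let sw := (PySem.List.pyRange 1 (n + 1) 1).foldl (pvSweepB hs.2) (1, 0)
  let m := (PySem.List.max? hs.1 (fun y => y)).getD 0
  let trains := if m > sw.1 then m else sw.1
  (trains, hs.2.foldl (fun u x => if x > trains then u + (x - trains) else u) 0)

def solve_alt (n : Int) (c : Int) (tickets : List (Int × Int)) : Int × Int :=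
  pvFinishB n (tickets.foldl
    (fun (hs : List Int × List Int) pb => (pvBumpB hs.1 (pb.2 - 1), pvBumpB hs.2 (pb.1 - 1)))
    (List.replicate c.toNat 0, List.replicate n.toNat 0))

-- ===== PRECONDITION & SPEC =====
-- Pre_ is the natural ticket domain. Outside it A raises (IndexError on an out-of-range
-- index, ValueError from max([]) when c = 0) or loops forever (a ticket with p ≤ 0),
-- except for small negative indices, which wrap in both Pythons alike (A and B agree
-- there; excluded only because these in-range ports do not model the wraparound).
def Pre_solve (n : Int) (c : Int) (tickets : List (Int × Int)) : Prop :=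
  0 ≤ n ∧ 1 ≤ c ∧ ∀ pb ∈ tickets, 1 ≤ pb.1 ∧ pb.1 ≤ n ∧ 1 ≤ pb.2 ∧ pb.2 ≤ c
instance (n : Int) (c : Int) (tickets : List (Int × Int)) : Decidable (Pre_solve n c tickets) := by unfold Pre_solve; infer_instance

def pvWitness_solve : Int × Int × (List (Int × Int)) := (3, 2, [(1, 1), (3, 2), (1, 2)])

def Spec_solve (n : Int) (c : Int) (tickets : List (Int × Int)) (out : Int × Int) : Prop := out = solve_alt n c tickets
instance (n : Int) (c : Int) (tickets : List (Int × Int)) (out : Int × Int) : Decidable (Spec_solve n c tickets out) := by unfold Spec_solve; infer_instance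

-- ===== CLAIM (what is proved, stated in full; the proofs are below) =====
def Claim_equal_solve : Prop := ∀ (n : Int) (c : Int) (tickets : List (Int × Int)), Dom_solve n c tickets → Pre_solve n c tickets → Spec_solve n c tickets (solve n c tickets)

-- ===== LEMMAS AND PROOFS =====
-- ceiling division a/p for p > 0, and the trains/total part of A's loop state
def pvCdiv (a p : Int) : Int := -(PySem.Int.floordiv (-a) p)
def pvStepT (tt : Int × Int) (p : Int) : Int × Int :=
  (pvWhile (tt.2 + 1).toNat p (tt.2 + 1) tt.1, tt.2 + 1)
theorem pvCdiv_spec {a p : Int} (hp : 0 < p) :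
    (pvCdiv a p - 1) * p < a ∧ a ≤ pvCdiv a p * p :=
  (PySem.Int.neg_floordiv_neg_eq_iff_of_pos hp).mp rfl

theorem pvCdiv_le_of_le_mul {a x p : Int} (hp : 0 < p) (h : a ≤ x * p) : pvCdiv a p ≤ x := by
  by_contra hlt
  push_neg at hlt
  have h2 := (pvCdiv_spec (a := a) hp).1
  have hx : x ≤ pvCdiv a p - 1 := by omega
  have := mul_le_mul_of_nonneg_right hx (le_of_lt hp)
  omega

theorem pvCdiv_mono_num {a b p : Int} (hp : 0 < p) (h : a ≤ b) : pvCdiv a p ≤ pvCdiv b p :=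
  pvCdiv_le_of_le_mul hp (h.trans (pvCdiv_spec hp).2)

theorem pvCdiv_nonneg {a p : Int} (hp : 0 < p) (ha : 0 ≤ a) : 0 ≤ pvCdiv a p := by
  by_contra hlt
  push_neg at hlt
  have h2 := (pvCdiv_spec (a := a) hp).2
  have : pvCdiv a p * p ≤ -1 * p := mul_le_mul_of_nonneg_right (by omega) (le_of_lt hp)
  omega

theorem pvCdiv_anti_den {a p q : Int} (hp : 0 < p) (hpq : p ≤ q) (ha : 0 ≤ a) :
    pvCdiv a q ≤ pvCdiv a p := by
  have hq : 0 < q := lt_of_lt_of_le hp hpq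
  apply pvCdiv_le_of_le_mul hq
  calc a ≤ pvCdiv a p * p := (pvCdiv_spec hp).2
    _ ≤ pvCdiv a p * q := mul_le_mul_of_nonneg_left hpq (pvCdiv_nonneg hp ha)

theorem pvCdiv_zero {p : Int} (hp : 0 < p) : pvCdiv 0 p = 0 :=
  (PySem.Int.neg_floordiv_neg_eq_iff_of_pos hp).mpr (by constructor <;> omega)

-- while loop = max with ceiling division
theorem pvWhile_eq (fuel : Nat) (p total trains : Int) (hp : 0 < p)
    (hfuel : total ≤ p * (trains + fuel)) :
    pvWhile fuel p total trains = max trains (pvCdiv total p) := by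
  induction fuel generalizing trains with
  | zero =>
    simp only [pvWhile]
    have hle : pvCdiv total p ≤ trains := by
      apply pvCdiv_le_of_le_mul hp
      rw [mul_comm]
      simpa using hfuel
    omega
  | succ m ih =>
    simp only [pvWhile]
    split
    · rename_i hcond
      rw [ih (trains + 1) (by
        have he : p * (trains + 1 + (m : Int)) = p * (trains + ((m : Int) + 1)) := by ring
        push_cast at hfuel ⊢
        omega)]
      have hlt : trains < pvCdiv total p := by
        have h2 := (pvCdiv_spec (a := total) hp).2
        have hm : trains * p < pvCdiv total p * p := by
          have : p * trains = trains * p := mul_comm _ _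
          omega
        exact lt_of_mul_lt_mul_right hm hp.le
      omega
    · rename_i hcond
      push_neg at hcond
      have : pvCdiv total p ≤ trains := by
        apply pvCdiv_le_of_le_mul hp
        rw [mul_comm]
        exact hcond
      omega
-- generic: foldl max upper bound
theorem pvFoldlMax_le {α : Type} (l : List α) (f : α → Int) (init M : Int)
    (h0 : init ≤ M) (h : ∀ x ∈ l, f x ≤ M) :
    l.foldl (fun a x => max a (f x)) init ≤ M := by
  induction l generalizing init with
  | nil => simpa using h0
  | cons y t ih =>
    simp only [List.foldl_cons]
    exact ih _ (by have := h y (by simp); omega) (fun x hx => h x (by simp [hx]))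

-- insertBy preserves pairwise for a relation compatible with the comparator
theorem pvInsertBy_pairwise {α : Type} (R : α → α → Prop) (bef : α → α → Bool)
    (h1 : ∀ a b, bef a b = true → R a b) (h2 : ∀ a b, bef a b = false → R b a)
    (htr : ∀ {a b c}, R a b → R b c → R a c) (x : α) :
    ∀ l : List α, l.Pairwise R → (PySem.List.insertBy bef x l).Pairwise R := by
  intro l
  induction l with
  | nil => intro _; simp [PySem.List.insertBy]
  | cons y ys ih =>
    intro hl
    rw [List.pairwise_cons] at hl
    simp only [PySem.List.insertBy]
    split
    · rename_i hb
      refine List.Pairwise.cons ?_ (List.Pairwise.cons hl.1 hl.2)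
      intro z hz
      rcases List.mem_cons.mp hz with rfl | hz'
      · exact h1 _ _ hb
      · exact htr (h1 _ _ hb) (hl.1 z hz')
    · rename_i hb
      refine List.Pairwise.cons ?_ (ih hl.2)
      intro z hz
      rcases (PySem.List.mem_insertBy bef x z ys).mp hz with rfl | hz'
      · exact h2 _ _ (Bool.not_eq_true _ ▸ (by simpa using hb))
      · exact hl.1 z hz'

-- the first components of a lexicographically sorted list are nondecreasing
theorem pvSorted2_fst_pairwise (tickets : List (Int × Int)) :
    (PySem.List.sorted2 tickets Prod.fst Prod.snd).Pairwise (fun a b => a.1 ≤ b.1) := by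
  show (List.foldl _ [] tickets).Pairwise _
  -- real proof
  have main : ∀ (l acc : List (Int × Int)), acc.Pairwise (fun a b : Int × Int => a.1 ≤ b.1) →
      (l.foldl (fun acc x => PySem.List.insertBy
        (fun a b => decide (a.1 < b.1) || !decide (b.1 < a.1) && decide (a.2 < b.2)) x acc) acc).Pairwise
        (fun a b : Int × Int => a.1 ≤ b.1) := by
    intro l
    induction l with
    | nil => intro acc h; simpa using h
    | cons y ys ih =>
      intro acc h
      simp only [List.foldl_cons]
      apply ih
      apply pvInsertBy_pairwise
      · intro a b hb
        simp only [Bool.or_eq_true, decide_eq_true_eq, Bool.and_eq_true, Bool.not_eq_true',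
          decide_eq_false_iff_not] at hb
        omega
      · intro a b hb
        simp only [Bool.or_eq_false_iff, decide_eq_false_iff_not, Bool.and_eq_false_iff] at hb
        omega
      · exact fun hab hbc => le_trans hab hbc
      · exact h
  exact main tickets [] (by simp)
-- A's loop state evolves componentwise: trains/total from the p's, the histograms pointwise
theorem pvFoldA_split (l : List (Int × Int)) (tr : Int) (cnt st : List Int) (tot : Int) :
    l.foldl pvLoopA (tr, cnt, st, tot)
    = (((l.map Prod.fst).foldl pvStepT (tr, tot)).1,
       l.foldl (fun c pb => pvBump c (pb.2 - 1)) cnt,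
       l.foldl (fun s pb => pvBump s (pb.1 - 1)) st,
       ((l.map Prod.fst).foldl pvStepT (tr, tot)).2) := by
  induction l generalizing tr cnt st tot with
  | nil => rfl
  | cons pb t ih =>
    simp only [List.foldl_cons, List.map_cons, pvLoopA, pvStepT]
    exact ih _ _ _ _

-- the trains/total loop is a running max of ceiling divisions over enumerated tickets
theorem pvTrains_eq (ps : List Int) : ∀ (tr tot : Int), (∀ p ∈ ps, 1 ≤ p) → 1 ≤ tr → 0 ≤ tot →
    ps.foldl pvStepT (tr, tot)
    = ((PySem.List.enumerate ps (tot + 1)).foldl (fun a ip => max a (pvCdiv ip.1 ip.2)) tr,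
       tot + ps.length) := by
  induction ps with
  | nil => intro tr tot _ _ _; simp [PySem.List.enumerate]
  | cons p t ih =>
    intro tr tot hb htr htot
    have hp : (1 : Int) ≤ p := hb p (by simp)
    simp only [List.foldl_cons, pvStepT, PySem.List.enumerate_cons]
    have hw : pvWhile (tot + 1).toNat p (tot + 1) tr = max tr (pvCdiv (tot + 1) p) := by
      apply pvWhile_eq _ _ _ _ (by omega)
      have h1 : tot + 1 ≤ tr + ((tot + 1).toNat : Int) := by omega
      have h2 : 1 * (tr + ((tot + 1).toNat : Int)) ≤ p * (tr + ((tot + 1).toNat : Int)) :=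
        mul_le_mul_of_nonneg_right hp (by omega)
      omega
    rw [hw, ih _ _ (fun x hx => hb x (by simp [hx])) (by omega) (by omega)]
    simp only [List.length_cons]
    rw [Prod.mk.injEq]
    refine ⟨rfl, by push_cast; ring⟩

-- histogram: length and pointwise content of the bump fold
theorem pvHist_len (vs : List Int) : ∀ h : List Int,
    (vs.foldl (fun acc v => pvBump acc (v - 1)) h).length = h.length := by
  induction vs with
  | nil => intro h; rfl
  | cons v t ih => intro h; simp only [List.foldl_cons]; rw [ih]; simp [pvBump]

theorem pvHist_getD (vs : List Int) : ∀ h : List Int, (∀ v ∈ vs, 1 ≤ v ∧ (v : Int) ≤ h.length) →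
    ∀ j : Nat, j < h.length →
    (vs.foldl (fun acc v => pvBump acc (v - 1)) h).getD j 0
      = h.getD j 0 + vs.count ((j : Int) + 1) := by
  induction vs with
  | nil => intro h _ j hj; simp
  | cons v t ih =>
    intro h hb j hj
    have hv := hb v (by simp)
    have hlen : (pvBump h (v - 1)).length = h.length := by simp [pvBump]
    simp only [List.foldl_cons]
    have hb' : ∀ x ∈ t, 1 ≤ x ∧ (x : Int) ≤ ((pvBump h (v - 1)).length : Int) := by
      intro x hx
      have := hb x (by simp [hx])
      rw [hlen]
      exact this
    rw [ih _ hb' j (by omega)]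
    have hset : (pvBump h (v - 1)).getD j 0
        = h.getD j 0 + (if v = (j : Int) + 1 then 1 else 0) := by
      by_cases he : v = (j : Int) + 1
      · have hidx : (v - 1).toNat = j := by omega
        simp [pvBump, List.getD_eq_getElem?_getD, List.getElem?_set, hidx, he, hj,
          List.getElem?_eq_getElem (show j < h.length by omega)]
      · have hidx : (v - 1).toNat ≠ j := by omega
        have hidx' : v.toNat - 1 ≠ j := by omega
        simp [pvBump, List.getD_eq_getElem?_getD, List.getElem?_set, hidx, hidx', he]
    rw [hset, List.count_cons]
    by_cases hcase : v = (j : Int) + 1 <;> simp [hcase] <;> push_cast <;> omega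

-- countP (· ≤ q) splits off the count at q
theorem pvCountP_split (ps : List Int) (q : Int) :
    ps.countP (fun p => decide (p ≤ q))
      = ps.countP (fun p => decide (p ≤ q - 1)) + ps.count q := by
  induction ps with
  | nil => simp
  | cons p t ih =>
    simp only [List.countP_cons, List.count_cons, ih]
    by_cases h1 : p = q
    · subst h1
      simp [show p ≤ p from le_refl p, show ¬ p ≤ p - 1 by omega]
      omega
    · by_cases h2 : p ≤ q
      · simp [h1, h2, show p ≤ q - 1 by omega]
        omega
      · simp [h1, h2, show ¬ p ≤ q - 1 by omega]

theorem pvCountP_nonpos (ps : List Int) (q : Int) (hq : q ≤ 0) (hb : ∀ p ∈ ps, 1 ≤ p) :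
    ps.countP (fun p => decide (p ≤ q)) = 0 := by
  rw [List.countP_eq_zero]
  intro p hp
  have := hb p hp
  simp; omega

-- sorted lower bound: at least k+1 elements are ≤ the k-th element
theorem pvSorted_count_lower (ps : List Int) (hs : ps.Pairwise (· ≤ ·)) (k : Nat)
    (hk : k < ps.length) :
    k + 1 ≤ ps.countP (fun p => decide (p ≤ ps[k])) := by
  have hsplit := List.countP_append (l₁ := ps.take (k+1)) (l₂ := ps.drop (k+1))
    (p := fun p => decide (p ≤ ps[k]))
  rw [List.take_append_drop] at hsplit
  have htake : (ps.take (k+1)).countP (fun p => decide (p ≤ ps[k])) = k + 1 := by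
    rw [List.countP_eq_length.mpr, List.length_take]
    · omega
    · intro x hx
      obtain ⟨j, hj, hje⟩ := List.mem_iff_getElem.mp hx
      have hjl : j < k + 1 := by simp [List.length_take] at hj; omega
      rw [List.getElem_take] at hje
      subst hje
      have hle : ps[j] ≤ ps[k] := by
        rcases eq_or_lt_of_le (by omega : j ≤ k) with rfl | hlt
        · exact le_refl _
        · exact List.pairwise_iff_getElem.mp hs j k (by omega) hk hlt
      simpa using hle
  omega

-- sorted upper bound: the (i-1)-th element is ≤ q when i elements are ≤ q
theorem pvSorted_getElem_le (ps : List Int) (hs : ps.Pairwise (· ≤ ·)) (q : Int) (i : Nat)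
    (hi : ps.countP (fun p => decide (p ≤ q)) = i) (h0 : 0 < i) (hlen : i - 1 < ps.length) :
    ps[i - 1] ≤ q := by
  by_contra hgt
  push_neg at hgt
  have hsplit := List.countP_append (l₁ := ps.take (i-1)) (l₂ := ps.drop (i-1))
    (p := fun p => decide (p ≤ q))
  rw [List.take_append_drop] at hsplit
  have hdrop : (ps.drop (i-1)).countP (fun p => decide (p ≤ q)) = 0 := by
    rw [List.countP_eq_zero]
    intro x hx
    obtain ⟨j, hj, hje⟩ := List.mem_iff_getElem.mp hx
    rw [List.getElem_drop] at hje
    subst hje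
    have hjlen : i - 1 + j < ps.length := by
      have := hj
      simp only [List.length_drop] at this
      omega
    have hle : ps[i-1] ≤ ps[i-1+j] := by
      rcases Nat.eq_zero_or_pos j with rfl | hpos
      · simp
      · exact List.pairwise_iff_getElem.mp hs (i-1) (i-1+j) hlen hjlen (by omega)
    simp only [decide_eq_true_eq] at *
    omega
  have htake : (ps.take (i-1)).countP (fun p => decide (p ≤ q)) ≤ i - 1 :=
    le_trans List.countP_le_length (by simp)
  omega
theorem pvIfMax (a t : Int) : (if t > a then t else a) = max a t := by
  split <;> omega

-- A's enumerate-fold equals the position sweep's max-fold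
theorem pvMax_eq (n : Int) (ps : List Int) (hs : ps.Pairwise (· ≤ ·))
    (hb : ∀ p ∈ ps, 1 ≤ p ∧ p ≤ n) :
    (PySem.List.enumerate ps 1).foldl (fun a ip => max a (pvCdiv ip.1 ip.2)) 1
    = (PySem.List.pyRange 1 (n + 1) 1).foldl
        (fun a q => max a (pvCdiv ((ps.countP (fun p => decide (p ≤ q)) : Int)) q)) 1 := by
  have hG := PySem.List.le_foldl_max_int (PySem.List.pyRange 1 (n + 1) 1)
      (fun q => pvCdiv ((ps.countP (fun p => decide (p ≤ q)) : Int)) q) 1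
  have hA := PySem.List.le_foldl_max_int (PySem.List.enumerate ps 1)
      (fun ip => pvCdiv ip.1 ip.2) 1
  apply le_antisymm
  · apply pvFoldlMax_le
    · exact hG.1
    · intro ip hip
      obtain ⟨k, hk, rfl⟩ := (PySem.List.mem_enumerate_iff _ _ _).mp hip
      have hpk := hb ps[k] (List.getElem_mem hk)
      have hcnt := pvSorted_count_lower ps hs k hk
      have hmono : pvCdiv (1 + (k : Int)) ps[k]
          ≤ pvCdiv ((ps.countP (fun p => decide (p ≤ ps[k])) : Int)) ps[k] := by
        apply pvCdiv_mono_num (by omega)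
        push_cast
        omega
      exact le_trans hmono (hG.2 _ (by rw [PySem.List.mem_pyRange_one]; omega))
  · apply pvFoldlMax_le
    · exact hA.1
    · intro q hq
      rw [PySem.List.mem_pyRange_one] at hq
      rcases Nat.eq_zero_or_pos (ps.countP (fun p => decide (p ≤ q))) with h0 | h0
      · rw [h0]
        have hz : pvCdiv ((0 : Nat) : Int) q = 0 := by
          rw [show (((0 : Nat)) : Int) = 0 from rfl]
          exact pvCdiv_zero (by omega)
        rw [hz]
        exact le_trans (by omega) hA.1
      · set i := ps.countP (fun p => decide (p ≤ q)) with hi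
        have hlen : i ≤ ps.length := hi ▸ List.countP_le_length
        have hgl : i - 1 < ps.length := by omega
        have hle := pvSorted_getElem_le ps hs q i hi.symm h0 hgl
        have hmem : (((1 : Int) + ((i - 1 : Nat) : Int)), ps[i - 1])
            ∈ PySem.List.enumerate ps 1 :=
          (PySem.List.mem_enumerate_iff _ _ _).mpr ⟨i - 1, hgl, rfl⟩
        have hpk := hb ps[i - 1] (List.getElem_mem hgl)
        have hanti : pvCdiv (i : Int) q ≤ pvCdiv (1 + ((i - 1 : Nat) : Int)) ps[i - 1] := by
          have h1 : (1 : Int) + ((i - 1 : Nat) : Int) = (i : Int) := by push_cast; omega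
          rw [h1]
          exact pvCdiv_anti_den (by omega) hle (by positivity)
        exact le_trans hanti (hA.2 _ hmem)

-- B's sweep: running prefix sums of the histogram are the countP values
theorem pvSweep_eq (n : Int) (seat : List Int) (ps : List Int)
    (hlen : seat.length = n.toNat)
    (hseat : ∀ j : Nat, j < seat.length → seat.getD j 0 = ps.count ((j : Int) + 1))
    (hb : ∀ p ∈ ps, 1 ≤ p) :
    ∀ N : Int, 0 ≤ N → N ≤ n →
    (PySem.List.pyRange 1 (N + 1) 1).foldl (pvSweepB seat) (1, 0)
    = ((PySem.List.pyRange 1 (N + 1) 1).foldl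
        (fun a q => max a (pvCdiv ((ps.countP (fun p => decide (p ≤ q)) : Int)) q)) 1,
       ((ps.countP (fun p => decide (p ≤ N)) : Int))) := by
  intro N hN
  induction N, hN using Int.le_induction with
  | base =>
    intro _
    rw [PySem.List.pyRange_one_eq_nil (by omega)]
    simp [pvCountP_nonpos ps 0 (by omega) hb]
  | succ N hN ih =>
    intro hNn
    rw [show N + 1 + 1 = (N + 1) + 1 from rfl,
      PySem.List.pyRange_one_succ_right (by omega : (1 : Int) ≤ N + 1),
      List.foldl_append, List.foldl_append, ih (by omega),
      List.foldl_cons, List.foldl_cons, List.foldl_nil, List.foldl_nil]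
    have hj : N.toNat < seat.length := by omega
    have hcum : seat.getD (N + 1 - 1).toNat 0 = ps.count (N + 1) := by
      rw [show N + 1 - 1 = N by ring, hseat N.toNat hj, Int.toNat_of_nonneg hN]
    have hsplit := pvCountP_split ps (N + 1)
    rw [show N + 1 - 1 = N by ring] at hsplit
    simp only [pvSweepB, hcum]
    rw [Prod.mk.injEq]
    constructor
    · show (if pvCdiv _ (N + 1) > _ then _ else _) = max _ (pvCdiv _ (N + 1))
      have harg : ((ps.countP (fun p => decide (p ≤ N)) : Int)) + (ps.count (N + 1) : Int)
          = ((ps.countP (fun p => decide (p ≤ N + 1)) : Int)) := by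
        rw [hsplit]; push_cast; ring
      rw [harg]
      exact pvIfMax _ _
    · rw [hsplit]; push_cast; ring
-- two bump-folds from the same histogram over permuted value lists agree
theorem pvHist_eq (vs ws : List Int) (m : Nat) (hperm : vs.Perm ws)
    (hbv : ∀ v ∈ vs, 1 ≤ v ∧ (v : Int) ≤ (m : Int)) :
    vs.foldl (fun acc v => pvBump acc (v - 1)) (List.replicate m 0)
    = ws.foldl (fun acc v => pvBump acc (v - 1)) (List.replicate m 0) := by
  have hbw : ∀ v ∈ ws, 1 ≤ v ∧ (v : Int) ≤ (m : Int) := fun v hv => hbv v (hperm.mem_iff.mpr hv)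
  apply List.ext_getElem
  · rw [pvHist_len, pvHist_len]
  · intro i h1 h2
    have him : i < m := by
      have := h1
      rw [pvHist_len] at this
      simpa using this
    have e1 := pvHist_getD vs (List.replicate m 0) (by simpa using hbv) i (by simpa using him)
    have e2 := pvHist_getD ws (List.replicate m 0) (by simpa using hbw) i (by simpa using him)
    have hc := hperm.count_eq ((i : Int) + 1)
    rw [← List.getD_eq_getElem _ 0 h1, ← List.getD_eq_getElem _ 0 h2, e1, e2, hc]

-- getD of the bump-fold over a replicate base is a pure count
theorem pvHist_getD_repl (vs : List Int) (m : Nat)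
    (hbv : ∀ v ∈ vs, 1 ≤ v ∧ (v : Int) ≤ (m : Int)) (j : Nat) (hj : j < m) :
    (vs.foldl (fun acc v => pvBump acc (v - 1)) (List.replicate m 0)).getD j 0
      = vs.count ((j : Int) + 1) := by
  rw [pvHist_getD vs (List.replicate m 0) (by simpa using hbv) j (by simpa using hj)]
  simp [List.getD_eq_getElem?_getD, List.getElem?_replicate, hj]

-- the sorted-ticket loop's trains value, as the sweep's max-fold over positions
theorem pvTrainsAll (n : Int) (tickets : List (Int × Int)) (hn : 0 ≤ n)
    (hb : ∀ pb ∈ tickets, 1 ≤ pb.1 ∧ pb.1 ≤ n ∧ 1 ≤ pb.2) :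
    (((PySem.List.sorted2 tickets Prod.fst Prod.snd).map Prod.fst).foldl pvStepT (1, 0)).1
    = (PySem.List.pyRange 1 (n + 1) 1).foldl
        (fun a q => max a (pvCdiv (((tickets.map Prod.fst).countP
          (fun p => decide (p ≤ q)) : Int)) q)) 1 := by
  have hperm : (PySem.List.sorted2 tickets Prod.fst Prod.snd).Perm tickets :=
    PySem.List.sorted2_perm _ _ _ _
  have hpermP : ((PySem.List.sorted2 tickets Prod.fst Prod.snd).map Prod.fst).Perm
      (tickets.map Prod.fst) := hperm.map _
  have hbP : ∀ p ∈ (PySem.List.sorted2 tickets Prod.fst Prod.snd).map Prod.fst,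
      1 ≤ p ∧ p ≤ n := by
    intro p hp
    obtain ⟨pb, hpb, rfl⟩ := List.mem_map.mp hp
    have := hb pb (hperm.mem_iff.mp hpb)
    exact ⟨this.1, this.2.1⟩
  have hsorted : ((PySem.List.sorted2 tickets Prod.fst Prod.snd).map Prod.fst).Pairwise
      (· ≤ ·) := List.pairwise_map.mpr (pvSorted2_fst_pairwise tickets)
  rw [pvTrains_eq _ 1 0 (fun p hp => (hbP p hp).1) (by omega) (by omega)]
  show (PySem.List.enumerate _ 1).foldl _ 1 = _
  rw [pvMax_eq n _ hsorted hbP]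
  have hcnt : ∀ q : Int, (((PySem.List.sorted2 tickets Prod.fst Prod.snd).map Prod.fst).countP
      (fun p => decide (p ≤ q))) = ((tickets.map Prod.fst).countP (fun p => decide (p ≤ q))) :=
    fun q => hpermP.countP_eq _
  simp only [hcnt]
-- B's paired histogram loop is two independent histogram loops
theorem pvPairSplit (l : List (Int × Int)) (a b : List Int) :
    l.foldl (fun hs pb => (pvBumpB hs.1 (pb.2 - 1), pvBumpB hs.2 (pb.1 - 1))) (a, b)
    = (l.foldl (fun s pb => pvBump s (pb.2 - 1)) a,
       l.foldl (fun s pb => pvBump s (pb.1 - 1)) b) := by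
  induction l generalizing a b with
  | nil => rfl
  | cons x t ih => simp only [List.foldl_cons]; exact ih _ _

-- the same bump-fold over a permuted pair list (projected by f) gives the same histogram
theorem pvPairFold_eq (l l' : List (Int × Int)) (f : Int × Int → Int) (m : Nat)
    (hperm : l.Perm l') (hbf : ∀ pb ∈ l, 1 ≤ f pb ∧ (f pb : Int) ≤ (m : Int)) :
    l.foldl (fun s pb => pvBump s (f pb - 1)) (List.replicate m 0)
    = l'.foldl (fun s pb => pvBump s (f pb - 1)) (List.replicate m 0) := by
  rw [← List.foldl_map (f := f) (g := fun s v => pvBump s (v - 1)),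
      ← List.foldl_map (f := f) (g := fun s v => pvBump s (v - 1))]
  apply pvHist_eq _ _ m (hperm.map f)
  intro v hv
  obtain ⟨pb, hpb, rfl⟩ := List.mem_map.mp hv
  exact hbf pb hpb

theorem pvSolve_eq (n c : Int) (tickets : List (Int × Int)) (hn : 0 ≤ n) (hc : 1 ≤ c)
    (hb : ∀ pb ∈ tickets, 1 ≤ pb.1 ∧ pb.1 ≤ n ∧ 1 ≤ pb.2 ∧ pb.2 ≤ c) :
    solve n c tickets = solve_alt n c tickets := by
  have hperm : (PySem.List.sorted2 tickets Prod.fst Prod.snd).Perm tickets :=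
    PySem.List.sorted2_perm _ _ _ _
  have hbts : ∀ pb ∈ PySem.List.sorted2 tickets Prod.fst Prod.snd,
      1 ≤ pb.1 ∧ pb.1 ≤ n ∧ 1 ≤ pb.2 ∧ pb.2 ≤ c :=
    fun pb hpb => hb pb (hperm.mem_iff.mp hpb)
  -- the two count histograms agree
  have hcnt : (PySem.List.sorted2 tickets Prod.fst Prod.snd).foldl
        (fun s pb => pvBump s (pb.2 - 1)) (List.replicate c.toNat 0)
      = tickets.foldl (fun s pb => pvBump s (pb.2 - 1)) (List.replicate c.toNat 0) :=
    pvPairFold_eq _ _ Prod.snd c.toNat hperm (fun pb hpb => by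
      have h := hbts pb hpb
      exact ⟨h.2.2.1, by omega⟩)
  -- the two seat histograms agree
  have hseat : (PySem.List.sorted2 tickets Prod.fst Prod.snd).foldl
        (fun s pb => pvBump s (pb.1 - 1)) (List.replicate n.toNat 0)
      = tickets.foldl (fun s pb => pvBump s (pb.1 - 1)) (List.replicate n.toNat 0) :=
    pvPairFold_eq _ _ Prod.fst n.toNat hperm (fun pb hpb => by
      have h := hbts pb hpb
      exact ⟨h.1, by omega⟩)
  -- B's seat histogram, via map fst
  have hseatB : tickets.foldl (fun s pb => pvBump s (pb.1 - 1)) (List.replicate n.toNat 0)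
      = (tickets.map Prod.fst).foldl (fun s v => pvBump s (v - 1)) (List.replicate n.toNat 0) :=
    (List.foldl_map (f := Prod.fst) (g := fun s v => pvBump s (v - 1))).symm
  have hbfst : ∀ v ∈ tickets.map Prod.fst, 1 ≤ v ∧ (v : Int) ≤ ((n.toNat : Nat) : Int) := by
    intro v hv
    obtain ⟨pb, hpb, rfl⟩ := List.mem_map.mp hv
    have h := hb pb hpb
    constructor
    · exact h.1
    · omega
  have hlenB : (tickets.foldl (fun s pb => pvBump s (pb.1 - 1))
      (List.replicate n.toNat 0)).length = n.toNat := by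
    rw [hseatB, pvHist_len]
    simp
  have hgetD : ∀ j : Nat, j < (tickets.foldl (fun s pb => pvBump s (pb.1 - 1))
        (List.replicate n.toNat 0)).length →
      (tickets.foldl (fun s pb => pvBump s (pb.1 - 1))
        (List.replicate n.toNat 0)).getD j 0 = (tickets.map Prod.fst).count ((j : Int) + 1) := by
    intro j hj
    rw [hseatB, pvHist_getD_repl _ n.toNat hbfst j (by rw [hlenB] at hj; exact hj)]
  -- trains from A's loop = trains from B's sweep
  have hsw := pvSweep_eq n
      (tickets.foldl (fun s pb => pvBump s (pb.1 - 1)) (List.replicate n.toNat 0))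
      (tickets.map Prod.fst) hlenB hgetD
      (fun p hp => (hbfst p hp).1) n hn (le_refl n)
  have hT := pvTrainsAll n tickets hn (fun pb hpb => ⟨(hb pb hpb).1, (hb pb hpb).2.1, (hb pb hpb).2.2.1⟩)
  -- unfold both programs and rewrite component by component
  simp only [solve, solve_alt]
  rw [pvFoldA_split, pvPairSplit, pvFinishA, pvFinishB]
  simp only
  rw [hcnt, hseat, hT, hsw]
  simp only
  rw [pvIfMax]
  congr 1
  exact PySem.List.foldl_congr_mem _ _ _ _ (by intro acc x _; split <;> omega)

-- ===== VERDICT (by name: the statement is the Claim_ definition above) =====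
theorem solve_spec : Claim_equal_solve := by
  intro n c tickets _ hpre
  show solve n c tickets = solve_alt n c tickets
  exact pvSolve_eq n c tickets hpre.1 hpre.2.1 hpre.2.2
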